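-- pv_equiv track=rewrite | github.com/barseghyanartur/fake.py | fake.py | organize_providers
-- ===== SOURCE A (Python) =====
-- from typing import (
--     Any,
--     Awaitable,
--     Callable,
--     Coroutine,
--     Dict,
--     Iterable,
--     List,
--     Literal,
--     Optional,
--     Sequence,
--     Set,
--     TextIO,
--     Tuple,
--     Type,
--     TypeVar,
--     Union,
--     get_args,
--     get_origin,
--     get_type_hints,
-- )
--
-- def organize_providers(provider_tags) -> Dict[str, Any]:
--     """Organize providers by category for easier navigation."""
--     categories: Dict[str, Any] = {}
--     for _provider, tags in provider_tags:
--         for tag in tags: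
--             if tag not in categories:
--                 categories[tag] = []
--             categories[tag].append(_provider)
--     # Sort the providers within each category
--     for category in categories:
--         categories[category] = sorted(categories[category])
--
--     # Return categories sorted by the category names
--     return dict(sorted(categories.items()))
-- ===== SOURCE B (Python) =====
-- def organize_providers(provider_tags):
--     """Organize providers by category: flatten to (tag, provider) pairs,
--     sort once, then slice the sorted list into runs of equal tags."""
--     pairs = sorted(
--         (tag, provider)
--         for provider, tags in provider_tags
--         for tag in tags
--     )
--     categories = {}
--     i = 0
--     n = len(pairs)
--     while i < n:
--         tag = pairs[i][0]
--         j = i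
--         while j < n and pairs[j][0] == tag:
--             j += 1
--         categories[tag] = [provider for _, provider in pairs[i:j]]
--         i = j
--     return categories
-- ===== Notes on version B (the rewrite author's own statement) =====
-- stated objective: alternative
-- what changed: Instead of accumulating a dict of per-tag lists and then sorting each value list and the items separately, B flattens everything into (tag, provider) pairs, sorts that list once, and slices it into runs of equal tags, which yields the categories already in sorted order with sorted provider lists.
import Mathlib
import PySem

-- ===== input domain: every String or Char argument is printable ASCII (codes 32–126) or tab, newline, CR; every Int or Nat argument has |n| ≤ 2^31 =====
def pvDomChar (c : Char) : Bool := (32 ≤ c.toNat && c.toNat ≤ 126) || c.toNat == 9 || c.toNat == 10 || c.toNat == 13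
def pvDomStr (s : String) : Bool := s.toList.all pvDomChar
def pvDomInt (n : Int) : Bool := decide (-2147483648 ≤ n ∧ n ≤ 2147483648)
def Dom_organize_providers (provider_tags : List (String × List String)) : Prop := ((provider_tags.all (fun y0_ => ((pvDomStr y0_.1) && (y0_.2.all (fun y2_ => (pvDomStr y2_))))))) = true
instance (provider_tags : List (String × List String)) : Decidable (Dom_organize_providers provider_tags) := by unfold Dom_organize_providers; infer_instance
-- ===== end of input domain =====

-- B replaces A's dict-accumulate / per-key sort / final item sort by: flatten to (tag, provider)
-- pairs, sort that list once, slice it into runs of equal tags (alternative decomposition, same cost).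


-- ===== PORT A =====
-- `if tag not in categories: categories[tag] = []` followed by `categories[tag].append(_provider)`
-- is exactly Dict.modify tag [] (· ++ [_provider]).  The final `sorted(categories.items())` compares
-- (key, value) tuples; the dict's keys are distinct, so the comparison is decided by the key alone and
-- sorting the items with key = fst is exact.  The value-sorting loop rewrites each value in place
-- (keys and their order unchanged), i.e. maps over the items.
def organize_providers (provider_tags : List (String × List String)) : List (String × List String) :=
  let categories : PySem.Dict String (List String) :=
    provider_tags.foldl
      (fun d pr => pr.2.foldl (fun d tag => d.modify tag [] (fun v => v ++ [pr.1])) d)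
      PySem.Dict.empty
  let sortedVals : PySem.Dict String (List String) :=
    ⟨categories.items.map (fun kv => (kv.1, PySem.List.sorted kv.2 (fun x => x) false))⟩
  PySem.List.sorted sortedVals.items (fun kv => kv.1) false

-- ===== PORT B =====
-- the double comprehension building `pairs` (before sorting)
def pvFlatten (provider_tags : List (String × List String)) : List (String × String) :=
  provider_tags.flatMap (fun pr => pr.2.map (fun tag => (tag, pr.1)))

-- the while-loops of Source B: slice the (sorted) pair list into runs of equal tags
def pvGroupRuns : List (String × String) → List (String × List String)
  | [] => []
  | q :: rest =>
      (q.1, q.2 :: (rest.takeWhile (fun r => r.1 == q.1)).map Prod.snd)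
        :: pvGroupRuns (rest.dropWhile (fun r => r.1 == q.1))
  termination_by l => l.length
  decreasing_by exact Nat.lt_succ_of_le (List.length_dropWhile_le _ _)

def organize_providers_alt (provider_tags : List (String × List String)) : List (String × List String) :=
  pvGroupRuns (PySem.List.sorted2 (pvFlatten provider_tags) Prod.fst Prod.snd false)

-- ===== PRECONDITION & SPEC =====
def Spec_organize_providers (provider_tags : List (String × List String)) (out : List (String × List String)) : Prop := out = organize_providers_alt provider_tags
instance (provider_tags : List (String × List String)) (out : List (String × List String)) : Decidable (Spec_organize_providers provider_tags out) := by unfold Spec_organize_providers; infer_instance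

-- ===== CLAIM (what is proved, stated in full; the proofs are below) =====
def Claim_equal_organize_providers : Prop := ∀ (provider_tags : List (String × List String)), Dom_organize_providers provider_tags → Spec_organize_providers provider_tags (organize_providers provider_tags)

-- ===== LEMMAS AND PROOFS =====

-- lexicographic ≤ on (tag, provider) pairs: the order `sorted(pairs)` produces
def pvLexLe (a b : String × String) : Prop := a.1 < b.1 ∨ (a.1 = b.1 ∧ a.2 ≤ b.2)

theorem pvLexLe_trans {a b c : String × String} (h1 : pvLexLe a b) (h2 : pvLexLe b c) : pvLexLe a c := by
  unfold pvLexLe at *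
  rcases h1 with h1 | ⟨e1, l1⟩ <;> rcases h2 with h2 | ⟨e2, l2⟩
  · exact Or.inl (lt_trans h1 h2)
  · exact Or.inl (e2 ▸ h1)
  · exact Or.inl (e1 ▸ h2)
  · exact Or.inr ⟨e1.trans e2, le_trans l1 l2⟩

-- the comparison sorted2 uses
def pvBefore (a b : String × String) : Bool :=
  decide (a.1 < b.1) || (!decide (b.1 < a.1) && decide (a.2 < b.2))

theorem pvBefore_true {a b : String × String} (h : pvBefore a b = true) : pvLexLe a b := by
  unfold pvBefore at h; unfold pvLexLe
  simp only [Bool.or_eq_true, Bool.and_eq_true, Bool.not_eq_true', decide_eq_true_eq,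
    decide_eq_false_iff_not] at h
  rcases h with h | ⟨h1, h2⟩
  · exact Or.inl h
  · rcases lt_or_eq_of_le (not_lt.mp h1) with hlt | heq
    · exact Or.inl hlt
    · exact Or.inr ⟨heq, le_of_lt h2⟩

theorem pvBefore_false {a b : String × String} (h : pvBefore a b = false) : pvLexLe b a := by
  unfold pvBefore at h; unfold pvLexLe
  simp only [Bool.or_eq_false_iff, Bool.and_eq_false_iff, Bool.not_eq_false',
    decide_eq_true_eq, decide_eq_false_iff_not] at h
  obtain ⟨h1, h2⟩ := h
  rcases h2 with h2 | h2
  · exact Or.inl h2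
  · rcases lt_or_eq_of_le (not_lt.mp h1) with hlt | heq
    · exact Or.inl hlt
    · exact Or.inr ⟨heq, not_lt.mp h2⟩

theorem pvInsertBy_pairwise (x : String × String) (ys : List (String × String))
    (h : ys.Pairwise pvLexLe) :
    (PySem.List.insertBy pvBefore x ys).Pairwise pvLexLe := by
  induction ys with
  | nil => simp [PySem.List.insertBy]
  | cons y t ih =>
    rw [List.pairwise_cons] at h
    obtain ⟨hy, ht⟩ := h
    by_cases hb : pvBefore x y = true
    · simp only [PySem.List.insertBy, hb, if_true]
      refine List.pairwise_cons.mpr ⟨?_, List.pairwise_cons.mpr ⟨hy, ht⟩⟩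
      intro z hz
      rcases List.mem_cons.mp hz with rfl | hz
      · exact pvBefore_true hb
      · exact pvLexLe_trans (pvBefore_true hb) (hy z hz)
    · simp only [PySem.List.insertBy, hb]
      refine List.pairwise_cons.mpr ⟨?_, ih ht⟩
      intro z hz
      rcases (PySem.List.mem_insertBy _ _ _ _).mp hz with rfl | hz
      · exact pvBefore_false (Bool.eq_false_iff.mpr hb)
      · exact hy z hz

theorem pvSorted2_pairwise (xs : List (String × String)) :
    (PySem.List.sorted2 xs Prod.fst Prod.snd false).Pairwise pvLexLe := by
  show (xs.foldl (fun acc x => PySem.List.insertBy pvBefore x acc) []).Pairwise pvLexLe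
  have : ∀ (l : List (String × String)) (acc : List (String × String)),
      acc.Pairwise pvLexLe → (l.foldl (fun acc x => PySem.List.insertBy pvBefore x acc) acc).Pairwise pvLexLe := by
    intro l
    induction l with
    | nil => intro acc h; simpa using h
    | cons a t ih => intro acc h; exact ih _ (pvInsertBy_pairwise a acc h)
  exact this xs [] (List.Pairwise.nil)

-- in a lex-sorted list, everything surviving dropWhile (·.1 == k) has tag strictly above k
theorem pvDropWhile_fst_gt (k : String) (l : List (String × String))
    (hp : l.Pairwise pvLexLe) (hk : ∀ r ∈ l, k ≤ r.1) :
    ∀ r ∈ l.dropWhile (fun r => r.1 == k), k < r.1 := by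
  induction l with
  | nil => simp
  | cons d t ih =>
    rw [List.pairwise_cons] at hp
    obtain ⟨hd, ht⟩ := hp
    by_cases hdk : d.1 = k
    · simp only [List.dropWhile_cons, hdk, beq_self_eq_true, if_true]
      exact ih ht (fun r hr => hk r (List.mem_cons_of_mem d hr))
    · simp only [List.dropWhile_cons, beq_iff_eq, hdk, if_false]
      intro r hr
      rcases List.mem_cons.mp hr with rfl | hr
      · exact lt_of_le_of_ne (hk r (List.mem_cons_self)) (fun e => hdk e.symm)
      · have h1 : k < d.1 := lt_of_le_of_ne (hk d (List.mem_cons_self)) (fun e => hdk e.symm)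
        have h2 : d.1 ≤ r.1 := by
          rcases hd r hr with h | ⟨e, _⟩
          · exact le_of_lt h
          · exact le_of_eq e
        exact lt_of_lt_of_le h1 h2

-- discard is a filter: two small identities
theorem pvDiscard_cons_self (s : List String) (k : String) :
    PySem.Set.discard (k :: s) k = PySem.Set.discard s k := by
  simp [PySem.Set.discard]

theorem pvDiscard_idem (s : List String) (k : String) :
    PySem.Set.discard (PySem.Set.discard s k) k = PySem.Set.discard s k := by
  simp [PySem.Set.discard, List.filter_filter]

-- discard k after prepending only-k elements
theorem pvDiscard_ofList_append (k : String) (l1 l2 : List String)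
    (h1 : ∀ a ∈ l1, a = k) :
    PySem.Set.discard (PySem.Set.ofList (l1 ++ l2)) k = PySem.Set.discard (PySem.Set.ofList l2) k := by
  induction l1 with
  | nil => rfl
  | cons a t ih =>
    have ha : a = k := h1 a List.mem_cons_self
    subst ha
    rw [List.cons_append, PySem.Set.ofList_cons, pvDiscard_cons_self, pvDiscard_idem]
    exact ih (fun b hb => h1 b (List.mem_cons_of_mem _ hb))

theorem pvDiscard_ofList_not_mem (k : String) (l : List String) (h : k ∉ l) :
    PySem.Set.discard (PySem.Set.ofList l) k = PySem.Set.ofList l := by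
  show List.filter _ _ = _
  apply List.filter_eq_self.mpr
  intro y hy
  have hyl : y ∈ l := (PySem.Set.mem_ofList _ _).mp hy
  have hne : y ≠ k := fun e => h (e ▸ hyl)
  simp [hne]

-- ofList of a ≤-sorted list is <-sorted
theorem pvOfList_pairwise_lt (xs : List String) (h : xs.Pairwise (· ≤ ·)) :
    (PySem.Set.ofList xs).Pairwise (· < ·) := by
  induction xs with
  | nil => simp [PySem.Set.ofList]
  | cons x t ih =>
    rw [List.pairwise_cons] at h
    obtain ⟨hx, ht⟩ := h
    rw [PySem.Set.ofList_cons]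
    refine List.pairwise_cons.mpr ⟨?_, ?_⟩
    · intro y hy
      have hym : y ∈ PySem.Set.ofList t ∧ y ≠ x := (PySem.Set.mem_discard _ _ _).mp hy
      exact lt_of_le_of_ne (hx y ((PySem.Set.mem_ofList _ _).mp hym.1)) (Ne.symm hym.2)
    · show (List.filter _ _).Pairwise _
      exact List.Pairwise.filter _ (ih ht)

-- the central characterisation of the run-slicing pass on a lex-sorted list
theorem pvGroupRuns_eq (ss : List (String × String)) (h : ss.Pairwise pvLexLe) :
    pvGroupRuns ss
      = (PySem.Set.ofList (ss.map Prod.fst)).map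
          (fun k => (k, (ss.filter (fun q => q.1 == k)).map Prod.snd)) := by
  induction ss using pvGroupRuns.induct with
  | case1 => simp [pvGroupRuns, PySem.Set.ofList]
  | case2 q rest ih =>
    rw [List.pairwise_cons] at h
    obtain ⟨hq, hrest⟩ := h
    have hsplit : rest = rest.takeWhile (fun r => r.1 == q.1) ++ rest.dropWhile (fun r => r.1 == q.1) :=
      (List.takeWhile_append_dropWhile).symm
    have hrun : ∀ r ∈ rest.takeWhile (fun r => r.1 == q.1), r.1 = q.1 := by
      intro r hr
      have := List.mem_takeWhile_imp hr
      simpa using this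
    have hrest' : ∀ r ∈ rest.dropWhile (fun r => r.1 == q.1), q.1 < r.1 := by
      apply pvDropWhile_fst_gt q.1 rest hrest
      intro r hr
      rcases hq r hr with hlt | ⟨heq, _⟩
      · exact le_of_lt hlt
      · exact le_of_eq heq
    have hPrest' : (rest.dropWhile (fun r => r.1 == q.1)).Pairwise pvLexLe :=
      hrest.sublist (List.dropWhile_sublist _)
    -- the key list of the cons case
    have hkeys : PySem.Set.ofList (((q :: rest).map Prod.fst))
        = q.1 :: PySem.Set.ofList ((rest.dropWhile (fun r => r.1 == q.1)).map Prod.fst) := by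
      rw [List.map_cons, PySem.Set.ofList_cons]
      congr 1
      have hmap : rest.map Prod.fst
          = (rest.takeWhile (fun r => r.1 == q.1)).map Prod.fst
            ++ (rest.dropWhile (fun r => r.1 == q.1)).map Prod.fst := by
        conv_lhs => rw [hsplit]
        rw [List.map_append]
      rw [hmap, pvDiscard_ofList_append q.1 _ _ (by
        intro a ha
        obtain ⟨r, hr, rfl⟩ := List.mem_map.mp ha
        exact hrun r hr)]
      apply pvDiscard_ofList_not_mem
      intro hk
      obtain ⟨r, hr, he⟩ := List.mem_map.mp hk
      exact absurd he (ne_of_gt (hrest' r hr))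
    -- the filter at the head key
    have hfilhead : (q :: rest).filter (fun r => r.1 == q.1) = q :: rest.takeWhile (fun r => r.1 == q.1) := by
      rw [List.filter_cons_of_pos (by simp)]
      congr 1
      conv_lhs => rw [hsplit]
      rw [List.filter_append,
        List.filter_eq_self.mpr (by intro a ha; simpa using hrun a ha),
        List.filter_eq_nil_iff.mpr (by intro a ha; simpa using ne_of_gt (hrest' a ha)),
        List.append_nil]
    -- the filters at the tail keys
    have hfiltail : ∀ k ∈ PySem.Set.ofList ((rest.dropWhile (fun r => r.1 == q.1)).map Prod.fst),
        (q :: rest).filter (fun r => r.1 == k)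
          = (rest.dropWhile (fun r => r.1 == q.1)).filter (fun r => r.1 == k) := by
      intro k hk
      obtain ⟨r0, hr0, rfl⟩ := List.mem_map.mp ((PySem.Set.mem_ofList _ _).mp hk)
      have hqk : q.1 ≠ r0.1 := ne_of_lt (hrest' r0 hr0)
      rw [List.filter_cons_of_neg (by simpa using hqk)]
      conv_lhs => rw [hsplit]
      rw [List.filter_append,
        List.filter_eq_nil_iff.mpr (by
          intro a ha
          have he : a.1 = q.1 := hrun a ha
          simpa [he] using hqk),
        List.nil_append]
    rw [pvGroupRuns, hkeys, List.map_cons, hfilhead, ih hPrest']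
    refine congrArg₂ List.cons (by simp) ?_
    exact (List.map_congr_left (fun k hk => by rw [hfiltail k hk])).symm

-- A's nested accumulation loop, re-read as a single loop over the flattened pairs
theorem pvFoldFlatten (pt : List (String × List String)) (d0 : PySem.Dict String (List String)) :
    pt.foldl (fun d pr => pr.2.foldl (fun d tag => d.modify tag [] (fun v => v ++ [pr.1])) d) d0
      = (pvFlatten pt).foldl (fun d q => d.modify q.1 [] (fun v => v ++ [q.2])) d0 := by
  induction pt generalizing d0 with
  | nil => rfl
  | cons pr t ih =>
    simp only [List.foldl_cons, pvFlatten, List.flatMap_cons, List.foldl_append, List.foldl_map]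
    exact ih _

theorem organize_providers_spec' (pt : List (String × List String)) :
    organize_providers pt = organize_providers_alt pt := by
  -- names
  set qs : List (String × String) := pvFlatten pt with hqs
  set ss : List (String × String) := PySem.List.sorted2 qs Prod.fst Prod.snd false with hss
  set d : PySem.Dict String (List String) :=
    qs.foldl (fun d q => d.modify q.1 [] (fun v => v ++ [q.2])) PySem.Dict.empty with hd
  have hp : ss.Pairwise pvLexLe := pvSorted2_pairwise qs
  have hperm : ss.Perm qs := PySem.List.sorted2_perm qs Prod.fst Prod.snd false
  -- facts about the dict A builds
  have hkeys : d.keys = PySem.Set.ofList (qs.map (fun q => q.1)) := by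
    rw [hd, PySem.Dict.keys_foldl_modify_key qs (fun q => q.1) [] (fun _ q => (fun v => v ++ [q.2]))]
    rfl
  have hnodup : d.keys.Nodup := by
    rw [hkeys]; exact PySem.Set.nodup_ofList _
  have hgetD : ∀ k, d.getD k [] = (qs.filter (fun q => q.1 == k)).map (fun q => q.2) := by
    intro k
    rw [hd, PySem.Dict.getD_foldl_modify_append qs PySem.Dict.empty k]
    rfl
  have hitems : d.items = d.keys.map (fun k => (k, d.getD k [])) :=
    PySem.Dict.items_eq_map_keys d hnodup []
  -- per-key value agreement: the run of a sorted pair list IS the sorted per-key list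
  have hval : ∀ k, (ss.filter (fun q => q.1 == k)).map Prod.snd
      = PySem.List.sorted ((qs.filter (fun q => q.1 == k)).map (fun q => q.2)) (fun x => x) false := by
    intro k
    refine (PySem.List.sorted_id_eq_of_perm_of_pairwise _ _ ?_ ?_).symm
    · exact (hperm.filter _).map _
    · have h1 : (ss.filter (fun q => q.1 == k)).Pairwise pvLexLe := hp.filter _
      rw [List.pairwise_map]
      refine List.Pairwise.imp_of_mem ?_ h1
      intro a b ha hb hab
      have hak : a.1 = k := by simpa using (List.mem_filter.mp ha).2
      have hbk : b.1 = k := by simpa using (List.mem_filter.mp hb).2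
      rcases hab with h | ⟨_, h⟩
      · rw [hak, hbk] at h; exact absurd h (lt_irrefl k)
      · exact h
  -- key lists: same distinct keys, B's strictly sorted
  have hkperm : ((PySem.Set.ofList (ss.map Prod.fst)) : List String).Perm d.keys := by
    rw [hkeys]
    refine (List.perm_ext_iff_of_nodup (PySem.Set.nodup_ofList _) (PySem.Set.nodup_ofList _)).mpr ?_
    intro a
    rw [PySem.Set.mem_ofList, PySem.Set.mem_ofList]
    exact (hperm.map Prod.fst).mem_iff
  have hklt : ((PySem.Set.ofList (ss.map Prod.fst)) : List String).Pairwise (· < ·) := by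
    refine pvOfList_pairwise_lt _ ?_
    rw [List.pairwise_map]
    refine hp.imp ?_
    intro a b hab
    rcases hab with h | ⟨h, _⟩
    · exact le_of_lt h
    · exact le_of_eq h
  -- assemble
  show PySem.List.sorted
      ((pt.foldl (fun d pr => pr.2.foldl (fun d tag => d.modify tag [] (fun v => v ++ [pr.1])) d)
        PySem.Dict.empty).items.map (fun kv => (kv.1, PySem.List.sorted kv.2 (fun x => x) false)))
      (fun kv => kv.1) false
    = pvGroupRuns ss
  rw [pvFoldFlatten pt PySem.Dict.empty, ← hqs, ← hd, hitems, List.map_map]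
  rw [pvGroupRuns_eq ss hp]
  refine PySem.List.sorted_eq_of_perm_of_pairwise_lt _ _ _ ?_ ?_
  · have : (fun k => (k, (ss.filter (fun q => q.1 == k)).map Prod.snd))
        = (fun k => ((k, PySem.List.sorted ((qs.filter (fun q => q.1 == k)).map (fun q => q.2)) (fun x => x) false) : String × List String)) := by
      funext k; rw [hval k]
    rw [this]
    refine hkperm.map _ |>.trans ?_
    refine List.Perm.of_eq ?_
    refine List.map_congr_left ?_
    intro k hk
    simp only [Function.comp]
    rw [hgetD k]
  · rw [List.pairwise_map]
    refine hklt.imp ?_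
    intro a b h
    exact h

-- ===== VERDICT (by name: the statement is the Claim_ definition above) =====
theorem organize_providers_spec : Claim_equal_organize_providers := by
  intro pt _
  show organize_providers pt = organize_providers_alt pt
  exact organize_providers_spec' pt
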